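-- pv_equiv track=rewrite | github.com/gremos/Semantic_DB_RAG | src/qa/sql_executor.py | validate_read_only
-- ===== SOURCE A (Python) =====
-- def validate_read_only(sql: str) -> bool:
--     """
--     Validate SQL is read-only (SELECT only)
--
--     Args:
--         sql: SQL statement
--
--     Returns:
--         True if read-only, False otherwise
--     """
--     sql_upper = sql.upper().strip()
--
--     # Must start with SELECT or WITH (for CTEs)
--     if not (sql_upper.startswith('SELECT') or sql_upper.startswith('WITH')):
--         return False
--
--     # Check for forbidden keywords
--     forbidden = [
--         'INSERT', 'UPDATE', 'DELETE', 'DROP', 'ALTER', 'CREATE',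
--         'TRUNCATE', 'EXEC', 'EXECUTE', 'GRANT', 'REVOKE', 'MERGE'
--     ]
--
--     for keyword in forbidden:
--         # Check for keyword as whole word
--         if f' {keyword} ' in f' {sql_upper} ':
--             return False
--
--     return True
-- ===== SOURCE B (Python) =====
-- def validate_read_only(sql: str) -> bool:
--     s = sql.upper().strip()
--     if not (s.startswith('SELECT') or s.startswith('WITH')):
--         return False
--     FORBIDDEN = {
--         'INSERT', 'UPDATE', 'DELETE', 'DROP', 'ALTER', 'CREATE',
--         'TRUNCATE', 'EXEC', 'EXECUTE', 'GRANT', 'REVOKE', 'MERGE'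
--     }
--     token = []
--     for ch in s + ' ':
--         if ch == ' ':
--             if ''.join(token) in FORBIDDEN:
--                 return False
--             token = []
--         else:
--             token.append(ch)
--     return True
-- ===== Notes on version B (the rewrite author's own statement) =====
-- stated objective: alternative
-- what changed: A pads the SQL and runs a separate ' KEYWORD ' substring scan for each of the 12 forbidden keywords; B makes a single left-to-right character pass that accumulates space-separated tokens and checks each token against a keyword set.
import Mathlib
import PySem

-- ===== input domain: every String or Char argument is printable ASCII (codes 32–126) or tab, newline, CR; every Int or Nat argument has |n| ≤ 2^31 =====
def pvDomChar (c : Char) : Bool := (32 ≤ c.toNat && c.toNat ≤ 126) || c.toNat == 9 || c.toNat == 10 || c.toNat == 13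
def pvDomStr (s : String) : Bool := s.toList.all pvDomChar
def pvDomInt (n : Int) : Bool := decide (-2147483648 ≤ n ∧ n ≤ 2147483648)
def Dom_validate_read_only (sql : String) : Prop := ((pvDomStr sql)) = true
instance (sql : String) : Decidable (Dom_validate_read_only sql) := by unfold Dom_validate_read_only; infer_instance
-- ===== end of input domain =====

-- B replaces A's twelve padded-substring scans by one left-to-right character scan that builds
-- space-separated tokens and tests each against a keyword set (objective: alternative).

-- ===== PORT A =====
def forbiddenListA : List (List Char) :=
  ["INSERT".toList, "UPDATE".toList, "DELETE".toList, "DROP".toList, "ALTER".toList, "CREATE".toList,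
   "TRUNCATE".toList, "EXEC".toList, "EXECUTE".toList, "GRANT".toList, "REVOKE".toList, "MERGE".toList]

def validate_read_only (sql : String) : Bool :=
  let sql_upper := PySem.Chars.strip (PySem.Chars.upper sql.toList)
  if !(PySem.Chars.startswith sql_upper "SELECT".toList || PySem.Chars.startswith sql_upper "WITH".toList) then
    false
  else if forbiddenListA.any (fun keyword =>
      PySem.Chars.isIn (' ' :: (keyword ++ [' '])) (' ' :: (sql_upper ++ [' ']))) then
    false
  else
    true

-- ===== PORT B =====
def forbiddenSetB : List (List Char) :=
  PySem.Set.ofList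
    ["INSERT".toList, "UPDATE".toList, "DELETE".toList, "DROP".toList, "ALTER".toList, "CREATE".toList,
     "TRUNCATE".toList, "EXEC".toList, "EXECUTE".toList, "GRANT".toList, "REVOKE".toList, "MERGE".toList]

-- Source B's character loop: token accumulator, flushed and tested at each space
def scanB (token : List Char) : List Char → Bool
  | [] => true
  | ch :: rest =>
      if ch == ' ' then
        if forbiddenSetB.contains token then false else scanB [] rest
      else
        scanB (token ++ [ch]) rest

def validate_read_only_alt (sql : String) : Bool :=
  let s := PySem.Chars.strip (PySem.Chars.upper sql.toList)
  if !(PySem.Chars.startswith s "SELECT".toList || PySem.Chars.startswith s "WITH".toList) then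
    false
  else
    scanB [] (s ++ [' '])

-- ===== PRECONDITION & SPEC =====
def Spec_validate_read_only (sql : String) (out : Bool) : Prop := out = validate_read_only_alt sql
instance (sql : String) (out : Bool) : Decidable (Spec_validate_read_only sql out) := by unfold Spec_validate_read_only; infer_instance

-- ===== CLAIM (what is proved, stated in full; the proofs are below) =====
def Claim_equal_validate_read_only : Prop := ∀ (sql : String), Dom_validate_read_only sql → Spec_validate_read_only sql (validate_read_only sql)

-- ===== LEMMAS AND PROOFS =====

def segs : List Char → List (List Char)
  | [] => [[]]
  | c :: cs => if c == ' ' then [] :: segs cs else (segs cs).modifyHead (c :: ·)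

theorem segs_head (s : List Char) :
    segs s = s.takeWhile (fun c => !(c == ' ')) :: (segs s).tail := by
  induction s with
  | nil => simp [segs]
  | cons c cs ih =>
    simp only [segs, List.takeWhile_cons]
    by_cases hc : c = ' '
    · simp [hc]
    · rw [ih]
      simp [hc, List.modifyHead]

theorem pref_iff (kw : List Char) (hkw : ' ' ∉ kw) (s : List Char) :
    (kw ++ [' ']) <+: (s ++ [' ']) ↔ kw = s.takeWhile (fun c => !(c == ' ')) := by
  induction kw generalizing s with
  | nil =>
    cases s with
    | nil => simp
    | cons a as =>
      simp only [List.nil_append, List.takeWhile_cons]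
      constructor
      · rintro h
        rcases List.cons_prefix_cons.mp h with ⟨rfl, -⟩
        simp
      · intro h
        by_cases ha : a = ' '
        · subst ha; exact List.cons_prefix_cons.mpr ⟨rfl, List.nil_prefix⟩
        · simp [ha] at h
  | cons k kr ih =>
    have hk : k ≠ ' ' := fun h => hkw (h ▸ List.mem_cons_self ..)
    have hkr : ' ' ∉ kr := fun h => hkw (List.mem_cons_of_mem _ h)
    cases s with
    | nil =>
      simp only [List.nil_append, List.takeWhile_nil]
      constructor
      · intro h
        rcases List.cons_prefix_cons.mp h with ⟨rfl, -⟩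
        exact absurd rfl hk
      · intro h; simp at h
    | cons a as =>
      simp only [List.cons_append, List.cons_prefix_cons, List.takeWhile_cons]
      by_cases ha : a = ' '
      · subst ha
        constructor
        · rintro ⟨rfl, -⟩; exact absurd rfl hk
        · intro h; simp at h
      · simp [ha, ih hkr as]

theorem infix_iff_mem_segs (kw : List Char) (hkw : ' ' ∉ kw) (s : List Char) :
    ((' ' :: (kw ++ [' '])) <:+: (' ' :: (s ++ [' ']))  ↔ kw ∈ segs s) ∧
    ((' ' :: (kw ++ [' '])) <:+: (s ++ [' ']) ↔ kw ∈ (segs s).tail) := by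
  induction s with
  | nil =>
    constructor
    · simp only [List.cons_append, List.infix_cons_iff]
      simp only [segs, List.mem_singleton, List.nil_append]
      constructor
      · rintro (h | h)
        · rcases List.cons_prefix_cons.mp h with ⟨-, h2⟩
          exact (pref_iff kw hkw []).mp h2
        · have := h.length_le; simp at this
      · rintro rfl
        exact Or.inl (List.prefix_refl _)
    · simp only [segs, List.tail_cons, List.not_mem_nil, iff_false, List.nil_append]
      intro h
      have := h.length_le; simp at this
  | cons c cs ih =>
    have hT : (' ' :: (kw ++ [' '])) <:+: (c :: cs ++ [' ']) ↔ kw ∈ (segs (c :: cs)).tail := by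
      simp only [List.cons_append, List.infix_cons_iff]
      by_cases hc : c = ' '
      · subst hc
        constructor
        · rintro (h | h)
          · rcases List.cons_prefix_cons.mp h with ⟨-, h2⟩
            have : kw = cs.takeWhile (fun c => !(c == ' ')) := (pref_iff kw hkw cs).mp h2
            simp only [segs, if_pos rfl, List.tail_cons]
            rw [segs_head cs, this]; exact List.mem_cons_self ..
          · simp only [segs, if_pos rfl, List.tail_cons]
            exact ih.1.mp (List.infix_cons_iff.mpr (Or.inr h))
        · intro h
          simp only [segs, if_pos rfl, List.tail_cons] at h
          rcases List.infix_cons_iff.mp (ih.1.mpr h) with h' | h'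
          · exact Or.inl h'
          · exact Or.inr h'
      · have hcb : (c == ' ') = false := by simp [hc]
        constructor
        · rintro (h | h)
          · rcases List.cons_prefix_cons.mp h with ⟨he, -⟩
            exact absurd he.symm hc
          · have := ih.2.mp h
            simp only [segs, hcb, if_neg, Bool.false_eq_true, ite_false]
            rw [segs_head cs] at this ⊢
            simpa [List.modifyHead] using this
        · intro h
          simp only [segs, hcb, Bool.false_eq_true, ite_false] at h
          rw [segs_head cs] at h
          simp only [List.modifyHead, List.tail_cons] at h
          refine Or.inr (ih.2.mpr ?_)
          rw [segs_head cs]; simpa using h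
    refine ⟨?_, hT⟩
    rw [List.infix_cons_iff]
    constructor
    · rintro (h | h)
      · rcases List.cons_prefix_cons.mp h with ⟨-, h2⟩
        have : kw = (c :: cs).takeWhile (fun c => !(c == ' ')) := (pref_iff kw hkw (c :: cs)).mp h2
        rw [segs_head (c :: cs), this]; exact List.mem_cons_self ..
      · exact (segs_head (c :: cs)) ▸ List.mem_cons_of_mem _ (hT.mp h)
    · intro h
      rw [segs_head (c :: cs)] at h
      rcases List.mem_cons.mp h with rfl | h'
      · exact Or.inl (List.cons_prefix_cons.mpr ⟨rfl, (pref_iff _ hkw (c :: cs)).mpr rfl⟩)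
      · exact Or.inr (hT.mpr h')

theorem scan_eq (s tok : List Char) :
    scanB tok (s ++ [' ']) = !((segs s).modifyHead (tok ++ ·)).any (fun seg => forbiddenSetB.contains seg) := by
  induction s generalizing tok with
  | nil =>
    simp only [List.nil_append, scanB, segs, List.modifyHead, List.any_cons, List.any_nil,
      List.append_nil]
    cases h : forbiddenSetB.contains tok <;> rfl
  | cons c cs ih =>
    by_cases hc : c = ' '
    · subst hc
      simp only [List.cons_append, scanB, beq_self_eq_true, if_true, segs, List.modifyHead]
      rw [ih []]
      have hid : (segs cs).modifyHead (fun x => [] ++ x) = segs cs := by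
        cases hsc : segs cs with
        | nil => rfl
        | cons a t => simp [List.modifyHead]
      rw [hid]
      simp only [List.append_nil, List.any_cons]
      cases h : forbiddenSetB.contains tok <;> cases (segs cs).any (fun seg => forbiddenSetB.contains seg) <;> rfl
    · have hcb : (c == ' ') = false := by simp [hc]
      simp only [List.cons_append, scanB, hcb, Bool.false_eq_true, if_false, segs, ite_false]
      rw [ih (tok ++ [c])]
      rw [segs_head cs]
      simp [List.modifyHead]

theorem spaces_not_in : ∀ kw ∈ forbiddenListA, ' ' ∉ kw := by decide

theorem mem_forbiddenSetB (x : List Char) : forbiddenSetB.contains x = true ↔ x ∈ forbiddenListA := by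
  constructor
  · intro h
    have := List.contains_iff_mem.mp h
    rw [forbiddenSetB] at this
    exact (PySem.Set.mem_ofList _ _).mp this
  · intro h
    exact List.contains_iff_mem.mpr ((PySem.Set.mem_ofList _ _).mpr h)

theorem any_eq (su : List Char) :
    forbiddenListA.any (fun keyword =>
      PySem.Chars.isIn (' ' :: (keyword ++ [' '])) (' ' :: (su ++ [' ']))) =
    (segs su).any (fun seg => forbiddenSetB.contains seg) := by
  rw [Bool.eq_iff_iff]
  simp only [List.any_eq_true, PySem.Chars.isIn_iff_infix, mem_forbiddenSetB]
  constructor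
  · rintro ⟨kw, hm, hi⟩
    exact ⟨kw, (infix_iff_mem_segs kw (spaces_not_in kw hm) su).1.mp hi, hm⟩
  · rintro ⟨seg, hs, hm⟩
    exact ⟨seg, hm, (infix_iff_mem_segs seg (spaces_not_in seg hm) su).1.mpr hs⟩

theorem ports_eq (sql : String) : validate_read_only sql = validate_read_only_alt sql := by
  simp only [validate_read_only, validate_read_only_alt]
  set su := PySem.Chars.strip (PySem.Chars.upper sql.toList) with hsu
  cases hg : (PySem.Chars.startswith su "SELECT".toList || PySem.Chars.startswith su "WITH".toList) with
  | false => rfl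
  | true =>
    simp only [Bool.not_true, Bool.false_eq_true, if_false]
    rw [scan_eq su [], any_eq su]
    have hid : (segs su).modifyHead (fun x => [] ++ x) = segs su := by
      cases hsc : segs su with
      | nil => rfl
      | cons a t => simp [List.modifyHead]
    rw [hid]
    cases (segs su).any (fun seg => forbiddenSetB.contains seg) <;> rfl

-- ===== VERDICT (by name: the statement is the Claim_ definition above) =====
theorem validate_read_only_spec : Claim_equal_validate_read_only := by
  intro sql _
  unfold Spec_validate_read_only
  exact ports_eq sql
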